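-- pv_equiv track=rewrite | github.com/Edgar-0/HybridCryptosystem | rotor_machine.py | decryptrm
-- ===== SOURCE A (Python) =====
-- def decryptrm(eoutput, keys):
--     c1 = c2= c3 = 0
--     doutput =""
--     for caracter in eoutput:
--         if caracter.isalpha():
--             r3 = keys[0][(keys[3].index(caracter)-c3)%26]
--             r2 = keys[0][(keys[2].index(r3)-c2)%26]
--             r1 = keys[0][(keys[1].index(r2)-c1)%26]
--             doutput+=r1
--             c1+=1
--             if c1==26:
--                 c1=0
--                 c2+=1
--             if c2==26:
--                 c2=0
--                 c3+=1
--             if c3==26: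
--                 c3=0
--         else:
--             doutput+=caracter
--     return doutput
-- ===== SOURCE B (Python) =====
-- def decryptrm(eoutput, keys):
--     alphabet = keys[0]
--     # pull out the letters, in order
--     stream = [ch for ch in eoutput if ch.isalpha()]
--     # three whole-stream passes, one per rotor (outermost rotor first)
--     for rotor, period in ((keys[3], 676), (keys[2], 26), (keys[1], 1)):
--         pos = {ch: k for k, ch in reversed(list(enumerate(rotor)))}
--         stream = [alphabet[(pos[ch] - n // period) % 26]
--                   for n, ch in enumerate(stream)]
--     # weave the decrypted letters back between the non-letters
--     it = iter(stream)
--     return "".join(next(it) if ch.isalpha() else ch for ch in eoutput)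
-- ===== Notes on version B (the rewrite author's own statement) =====
-- stated objective: alternative
-- what changed: B restructures A's single stateful pass (three odometer counters, three list.index scans per letter) into staged whole-stream passes: extract the letters, then run three separate sweeps over the entire letter stream (one per rotor, with the shift derived from enumerate position via n//676, n//26, n), using a first-occurrence position dict built once per rotor, and finally weave the decrypted letters back between the unchanged non-letters.
-- outside the precondition, e.g. on decryptrm('!', []): A returns '!', B raises IndexError; on decryptrm('A', [['A'], ['A'], ['A'], ['A']]): A returns 'A', B returns 'A'
import Mathlib
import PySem

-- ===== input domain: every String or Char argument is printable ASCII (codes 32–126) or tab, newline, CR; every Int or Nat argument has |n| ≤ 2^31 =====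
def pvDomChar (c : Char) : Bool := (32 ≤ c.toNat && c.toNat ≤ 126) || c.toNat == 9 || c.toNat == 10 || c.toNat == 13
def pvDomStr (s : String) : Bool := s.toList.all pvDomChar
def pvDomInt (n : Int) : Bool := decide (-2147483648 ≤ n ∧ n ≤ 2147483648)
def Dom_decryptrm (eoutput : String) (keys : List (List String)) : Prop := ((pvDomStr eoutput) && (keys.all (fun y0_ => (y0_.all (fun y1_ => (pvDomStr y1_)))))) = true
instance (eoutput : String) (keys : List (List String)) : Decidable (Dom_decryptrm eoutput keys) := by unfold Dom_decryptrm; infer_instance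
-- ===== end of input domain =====

-- B replaces A's single stateful pass (three cascading counters, three list.index scans per letter)
-- by staged whole-stream passes: extract the letters, three separate sweeps (one per rotor) with the
-- shift read off the enumerate position, then weave the letters back in (objective: alternative).
-- Equivalence is about the RETURN value; neither program mutates its arguments.

-- ===== PORT A =====
-- loop body of A: state = ((c1, c2, c3), doutput); raising primitives (keys[i], list.index) are
-- rendered total with .getD defaults — exact on Pre_, where they never fire
def decryptrmStep (keys : List (List String)) (st : (Int × Int × Int) × String) (caracter : Char) : (Int × Int × Int) × String :=
  let c1 := st.1.1
  let c2 := st.1.2.1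
  let c3 := st.1.2.2
  if PySem.Chars.isalpha caracter then
    let k0 := (PySem.List.pyGet? keys 0).getD []
    let r3 := PySem.List.pyGetD k0 (PySem.Int.mod ((((PySem.List.index? ((PySem.List.pyGet? keys 3).getD []) (String.ofList [caracter])).getD 0 : Nat) : Int) - c3) 26) ""
    let r2 := PySem.List.pyGetD k0 (PySem.Int.mod ((((PySem.List.index? ((PySem.List.pyGet? keys 2).getD []) r3).getD 0 : Nat) : Int) - c2) 26) ""
    let r1 := PySem.List.pyGetD k0 (PySem.Int.mod ((((PySem.List.index? ((PySem.List.pyGet? keys 1).getD []) r2).getD 0 : Nat) : Int) - c1) 26) ""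
    let doutput := st.2 ++ r1
    let c1 := c1 + 1
    let c12 := if c1 = 26 then ((0 : Int), c2 + 1) else (c1, c2)
    let c23 := if c12.2 = 26 then ((0 : Int), c3 + 1) else (c12.2, c3)
    let c3 := if c23.2 = 26 then (0 : Int) else c23.2
    ((c12.1, c23.1, c3), doutput)
  else
    (st.1, st.2 ++ String.ofList [caracter])

def decryptrm (eoutput : String) (keys : List (List String)) : String :=
  (eoutput.toList.foldl (decryptrmStep keys) ((0, 0, 0), "")).2

-- ===== PORT B =====
-- B's per-rotor position dict: {ch: k for k, ch in reversed(list(enumerate(rotor)))}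
def pvStagePos (rotor : List String) : PySem.Dict String Int :=
  ((PySem.List.enumerate rotor).reverse).foldl (fun pos p => pos.insert p.2 p.1) PySem.Dict.empty

-- one whole-stream pass: [alphabet[(pos[ch] - n // period) % 26] for n, ch in enumerate(stream)]
-- (the raising lookups alphabet[i] / pos[ch] are rendered total with defaults — exact on Pre_, where they never fire)
def pvStage (alphabet rotor : List String) (period : Int) (stream : List String) : List String :=
  let pos := pvStagePos rotor
  (PySem.List.enumerate stream).map
    (fun p => PySem.List.pyGetD alphabet (PySem.Int.mod (pos.getD p.2 0 - PySem.Int.floordiv p.1 period) 26) "")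

-- "".join(next(it) if ch.isalpha() else ch for ch in eoutput): the stream always holds exactly one
-- entry per alphabetic char of the text, so the exhausted-iterator case is unreachable
def pvWeave : List Char → List String → List String
  | [], _ => []
  | c :: l, stream =>
    if PySem.Chars.isalpha c then
      match stream with
      | [] => []
      | s :: rest => s :: pvWeave l rest
    else String.ofList [c] :: pvWeave l stream

def decryptrm_alt (eoutput : String) (keys : List (List String)) : String :=
  let alphabet := (PySem.List.pyGet? keys 0).getD []
  let stream0 := (eoutput.toList.filter PySem.Chars.isalpha).map (fun c => String.ofList [c])
  let s3 := pvStage alphabet ((PySem.List.pyGet? keys 3).getD []) 676 stream0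
  let s2 := pvStage alphabet ((PySem.List.pyGet? keys 2).getD []) 26 s3
  let s1 := pvStage alphabet ((PySem.List.pyGet? keys 1).getD []) 1 s2
  PySem.Str.join "" (pvWeave eoutput.toList s1)

-- ===== PRECONDITION & SPEC =====
-- Pre_ requires ≥ 4 rotors (A returns letter-free input unchanged even with fewer, but B's upfront
-- rotor preprocessing of keys[1..3] itself raises there), and, when the input contains a letter, a
-- consistent rotor set — an output alphabet keys[0] of ≥ 26 entries whose first 26 entries are all
-- wired into rotors keys[1] and keys[2], and every input letter present in rotor keys[3]; this wiring
-- is a sufficient condition for A not to raise (ValueError/IndexError), so a few letter inputs whose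
-- chains happen to succeed without it (on which both programs return the same value) are also excluded.
def Pre_decryptrm (eoutput : String) (keys : List (List String)) : Prop :=
  4 ≤ keys.length ∧
  (eoutput.toList.any PySem.Chars.isalpha = true →
    (26 ≤ (keys.getD 0 []).length ∧
     eoutput.toList.all (fun c => !PySem.Chars.isalpha c || (keys.getD 3 []).contains (String.ofList [c])) = true ∧
     ((keys.getD 0 []).take 26).all (fun s => (keys.getD 2 []).contains s && (keys.getD 1 []).contains s) = true))
instance (eoutput : String) (keys : List (List String)) : Decidable (Pre_decryptrm eoutput keys) := by unfold Pre_decryptrm; infer_instance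

def pvWitness_decryptrm : String × List (List String) :=
  ("IVVS AVDS!",
   [["A","B","C","D","E","F","G","H","I","J","K","L","M","N","O","P","Q","R","S","T","U","V","W","X","Y","Z"],
    ["E","K","M","F","L","G","D","Q","V","Z","N","T","O","W","Y","H","X","U","S","P","A","I","B","R","C","J"],
    ["A","J","D","K","S","I","R","U","X","B","L","H","W","T","M","C","Q","G","Z","N","P","Y","F","V","O","E"],
    ["B","D","F","H","J","L","C","P","R","T","X","V","Z","N","Y","E","I","W","G","A","K","M","U","S","Q","O"]])

def Spec_decryptrm (eoutput : String) (keys : List (List String)) (out : String) : Prop := out = decryptrm_alt eoutput keys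
instance (eoutput : String) (keys : List (List String)) (out : String) : Decidable (Spec_decryptrm eoutput keys out) := by unfold Spec_decryptrm; infer_instance

-- ===== CLAIM (what is proved, stated in full; the proofs are below) =====
def Claim_equal_decryptrm : Prop := ∀ (eoutput : String) (keys : List (List String)), Dom_decryptrm eoutput keys → Pre_decryptrm eoutput keys → Spec_decryptrm eoutput keys (decryptrm eoutput keys)

-- ===== LEMMAS AND PROOFS =====

lemma pv_intersperse_nil_flatten : ∀ (ls : List (List Char)), (List.intersperse [] ls).flatten = ls.flatten
  | [] => rfl
  | [_] => by simp
  | a :: b :: t => by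
      simp only [List.intersperse]
      simp [pv_intersperse_nil_flatten (b :: t)]

lemma pv_join_cons (x : String) (l : List String) :
    PySem.Str.join "" (x :: l) = x ++ PySem.Str.join "" l := by
  cases l with
  | nil => simp [PySem.Str.join, PySem.Chars.join, List.intercalate]
  | cons y t =>
      simp only [PySem.Str.join, PySem.Chars.join, List.intercalate, List.map_cons]
      simp only [List.intersperse]
      simp [pv_intersperse_nil_flatten]

-- the letter both programs produce for the (n+1)-st letter c
def pvR (keys : List (List String)) (n : Nat) (c : Char) : String :=
  let k0 := (PySem.List.pyGet? keys 0).getD []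
  let r3 := PySem.List.pyGetD k0 (PySem.Int.mod ((((PySem.List.index? ((PySem.List.pyGet? keys 3).getD []) (String.ofList [c])).getD 0 : Nat) : Int) - ((n / 676 : Nat) : Int)) 26) ""
  let r2 := PySem.List.pyGetD k0 (PySem.Int.mod ((((PySem.List.index? ((PySem.List.pyGet? keys 2).getD []) r3).getD 0 : Nat) : Int) - ((n / 26 : Nat) : Int)) 26) ""
  PySem.List.pyGetD k0 (PySem.Int.mod ((((PySem.List.index? ((PySem.List.pyGet? keys 1).getD []) r2).getD 0 : Nat) : Int) - ((n : Nat) : Int)) 26) ""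

-- reference output pieces: the decrypted text as a list of one-piece strings, n letters already seen
def pvOut (keys : List (List String)) : List Char → Nat → List String
  | [], _ => []
  | c :: l, n =>
      if PySem.Chars.isalpha c then pvR keys n c :: pvOut keys l (n + 1)
      else String.ofList [c] :: pvOut keys l n

-- (x - (m % 26)) % 26 = (x - m) % 26  in Python arithmetic
lemma pv_modsub (x : Int) (m : Nat) :
    PySem.Int.mod (x - ((m % 26 : Nat) : Int)) 26 = PySem.Int.mod (x - (m : Int)) 26 := by
  rw [PySem.Int.mod_eq_emod_of_pos (by norm_num), PySem.Int.mod_eq_emod_of_pos (by norm_num)]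
  omega

lemma pv_stepA_alpha (keys : List (List String)) (n : Nat) (s : String) (c : Char)
    (ha : PySem.Chars.isalpha c = true) :
    decryptrmStep keys ((((n % 26 : Nat) : Int), ((n / 26 % 26 : Nat) : Int), ((n / 676 % 26 : Nat) : Int)), s) c
      = (((((n + 1) % 26 : Nat) : Int), (((n + 1) / 26 % 26 : Nat) : Int), (((n + 1) / 676 % 26 : Nat) : Int)),
          s ++ pvR keys n c) := by
  simp only [decryptrmStep, ha, if_true, pvR]
  simp only [pv_modsub]
  refine Prod.ext ?_ rfl
  split_ifs <;> (refine Prod.ext ?_ (Prod.ext ?_ ?_)) <;> simp_all <;> omega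

-- A's fold from letter count n with accumulator s produces s ++ join (pvOut l n)
lemma pv_fold_out (keys : List (List String)) :
    ∀ (l : List Char) (n : Nat) (s : String),
      (l.foldl (decryptrmStep keys)
          ((((n % 26 : Nat) : Int), ((n / 26 % 26 : Nat) : Int), ((n / 676 % 26 : Nat) : Int)), s)).2
        = s ++ PySem.Str.join "" (pvOut keys l n)
  | [], n, s => by simp [pvOut, PySem.Str.join, PySem.Chars.join, List.intercalate]
  | c :: l, n, s => by
      by_cases ha : PySem.Chars.isalpha c
      · simp only [List.foldl_cons, pv_stepA_alpha keys n s c ha, pvOut, ha, if_true]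
        rw [pv_fold_out keys l (n + 1) (s ++ pvR keys n c), pv_join_cons]
        simp [String.append_assoc]
      · simp only [List.foldl_cons, decryptrmStep, ha, if_false, Bool.false_eq_true, pvOut]
        rw [pv_fold_out keys l n (s ++ String.ofList [c])]
        simp only [pv_join_cons]
        simp [String.append_assoc]

-- ----- B side -----

-- folding unconditional inserts: lookup = last insertion for that key, i.e. first match in ps.reverse
lemma pv_foldl_insert_get? (v : String) :
    ∀ (ps : List (Int × String)) (d : PySem.Dict String Int),
      ((ps.foldl (fun pos p => pos.insert p.2 p.1) d).get? v)
        = ((ps.reverse.find? (fun p => p.2 == v)).map (·.1)).or (d.get? v)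
  | [], d => by simp
  | p :: ps, d => by
      simp only [List.foldl_cons, List.reverse_cons]
      rw [pv_foldl_insert_get? v ps (d.insert p.2 p.1), List.find?_append]
      cases hf : ps.reverse.find? (fun p => p.2 == v) with
      | some q => simp
      | none =>
          by_cases hv : v = p.2
          · subst hv
            simp [PySem.Dict.get?_insert]
          · have hb : (p.2 == v) = false := by simpa using Ne.symm hv
            simp [PySem.Dict.get?_insert, hv, List.find?, hb]

lemma pv_find?_enumerate (v : String) :
    ∀ (rotor : List String) (s : Int),
      ((PySem.List.enumerate rotor s).find? (fun p => p.2 == v))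
        = (PySem.List.index? rotor v).map (fun k => (s + (k : Int), v))
  | [], s => by simp [PySem.List.enumerate]
  | x :: xs, s => by
      rw [PySem.List.enumerate_cons]
      by_cases hxv : x = v
      · subst hxv
        rw [PySem.List.index?_cons_self]
        simp
      · rw [PySem.List.index?_cons_of_ne xs hxv]
        rw [List.find?_cons_of_neg (by simpa using hxv)]
        rw [pv_find?_enumerate v xs (s + 1)]
        cases h : PySem.List.index? xs v with
        | none => simp
        | some k =>
            simp only [Option.bind_eq_bind, Option.bind_some, Option.map_some,
              Option.some.injEq, Prod.mk.injEq, pure]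
            push_cast
            exact ⟨by ring, trivial⟩

lemma pvStagePos_getD (rotor : List String) (v : String) :
    (pvStagePos rotor).getD v 0 = (((PySem.List.index? rotor v).getD 0 : Nat) : Int) := by
  rw [PySem.Dict.getD_eq_get?_getD, pvStagePos, pv_foldl_insert_get? v, List.reverse_reverse,
      pv_find?_enumerate v rotor 0]
  cases h : PySem.List.index? rotor v <;> simp

-- enumerating the image of an enumerate-map keeps the indices aligned
lemma pv_enumerate_map_enumerate {α β : Type} (g : Int × α → β) :
    ∀ (xs : List α) (s : Int),
      PySem.List.enumerate ((PySem.List.enumerate xs s).map g) s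
        = (PySem.List.enumerate xs s).map (fun p => (p.1, g p))
  | [], s => by simp [PySem.List.enumerate]
  | x :: xs, s => by
      rw [PySem.List.enumerate_cons]
      simp only [List.map_cons]
      rw [PySem.List.enumerate_cons, pv_enumerate_map_enumerate g xs (s + 1)]

-- one stage, as an enumerate-map of pvG
def pvG (alphabet rotor : List String) (period : Int) (p : Int × String) : String :=
  PySem.List.pyGetD alphabet (PySem.Int.mod ((pvStagePos rotor).getD p.2 0 - PySem.Int.floordiv p.1 period) 26) ""

lemma pvStage_eq (a r : List String) (per : Int) (st : List String) :
    pvStage a r per st = (PySem.List.enumerate st).map (pvG a r per) := rfl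

-- the three stages collapse to one enumerate-map of the composed transform
lemma pv_stage3_comp (a r1 r2 r3 : List String) (st : List String) :
    pvStage a r1 1 (pvStage a r2 26 (pvStage a r3 676 st))
      = (PySem.List.enumerate st).map
          (fun p => pvG a r1 1 (p.1, pvG a r2 26 (p.1, pvG a r3 676 p))) := by
  rw [pvStage_eq a r3, pvStage_eq a r2, pvStage_eq a r1,
      pv_enumerate_map_enumerate (pvG a r3 676) st 0, List.map_map,
      pv_enumerate_map_enumerate _ st 0, List.map_map]
  rfl

lemma pv_floordiv676 (n : Nat) : PySem.Int.floordiv (n : Int) 676 = ((n / 676 : Nat) : Int) := by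
  exact_mod_cast PySem.Int.floordiv_natCast n 676

lemma pv_floordiv26 (n : Nat) : PySem.Int.floordiv (n : Int) 26 = ((n / 26 : Nat) : Int) := by
  exact_mod_cast PySem.Int.floordiv_natCast n 26

lemma pv_floordiv1 (n : Nat) : PySem.Int.floordiv (n : Int) 1 = (n : Int) := by
  have := PySem.Int.floordiv_natCast n 1
  simpa using this

-- the composed transform sends ((n : Int), "c") to pvR keys n c
lemma pv_comp_pvR (keys : List (List String)) (n : Nat) (c : Char) :
    pvG ((PySem.List.pyGet? keys 0).getD []) ((PySem.List.pyGet? keys 1).getD []) 1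
      (((n : Nat) : Int), pvG ((PySem.List.pyGet? keys 0).getD []) ((PySem.List.pyGet? keys 2).getD []) 26
        (((n : Nat) : Int), pvG ((PySem.List.pyGet? keys 0).getD []) ((PySem.List.pyGet? keys 3).getD []) 676
          (((n : Nat) : Int), String.ofList [c])))
      = pvR keys n c := by
  simp only [pvG, pvR, pvStagePos_getD, pv_floordiv676, pv_floordiv26, pv_floordiv1]

-- weaving the composed stream back equals the reference output, start index generalized
lemma pv_weave_gen (keys : List (List String)) :
    ∀ (l : List Char) (n : Nat),
      pvWeave l
        ((PySem.List.enumerate ((l.filter PySem.Chars.isalpha).map (fun c => String.ofList [c])) ((n : Nat) : Int)).map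
          (fun p => pvG ((PySem.List.pyGet? keys 0).getD []) ((PySem.List.pyGet? keys 1).getD []) 1
            (p.1, pvG ((PySem.List.pyGet? keys 0).getD []) ((PySem.List.pyGet? keys 2).getD []) 26
              (p.1, pvG ((PySem.List.pyGet? keys 0).getD []) ((PySem.List.pyGet? keys 3).getD []) 676 p))))
        = pvOut keys l n
  | [], n => by simp [pvWeave, pvOut]
  | c :: l, n => by
      by_cases ha : PySem.Chars.isalpha c
      · rw [show (c :: l).filter PySem.Chars.isalpha = c :: l.filter PySem.Chars.isalpha from by
          simp [List.filter, ha]]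
        simp only [List.map_cons, PySem.List.enumerate_cons, List.map_cons]
        simp only [pvWeave, ha, if_true]
        rw [pv_comp_pvR keys n c]
        have hcast : ((n : Nat) : Int) + 1 = (((n + 1 : Nat)) : Int) := by push_cast; ring
        rw [hcast, pv_weave_gen keys l (n + 1)]
        simp [pvOut, ha]
      · rw [show (c :: l).filter PySem.Chars.isalpha = l.filter PySem.Chars.isalpha from by
          simp [List.filter, ha]]
        simp only [pvWeave, ha]
        rw [pv_weave_gen keys l n]
        simp [pvOut, ha]

-- ===== VERDICT (by name: the statement is the Claim_ definition above) =====
theorem decryptrm_spec : Claim_equal_decryptrm := by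
  intro eoutput keys _hdom _hpre
  unfold Spec_decryptrm decryptrm decryptrm_alt
  have hA := pv_fold_out keys eoutput.toList 0 ""
  have hB := pv_weave_gen keys eoutput.toList 0
  simp only [Nat.cast_zero] at hB
  dsimp only
  rw [pv_stage3_comp, hB]
  simpa using hA
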